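-- pv_equiv track=rewrite | github.com/zxgcqupt/NASA_Project | hybrid_model.py | risk_quantification
-- ===== SOURCE A (Python) =====
-- def risk_quantification(val):
--     event_risk = []
--     for i in range(len(val)):
--         item = val[i].lstrip() ## remove the space at the start of each item
--         if item in rate_five:
--             event_risk.append(5)
--         elif item in rate_four:
--             event_risk.append(4)
--         elif item in rate_three:
--             event_risk.append(3)
--         elif item in rate_two:
--             event_risk.append(2)
--         elif item in rate_one:
--             event_risk.append(1)
--     return max(event_risk)
--
-- rate_five = ['General Declared Emergency', 'General Physical Injury / Incapacitation', 'Flight Crew Inflight Shutdown',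
--              'Air Traffic Control Separated Traffic', 'Aircraft Aircraft Damaged']
--
-- rate_four = ['General Evacuated', 'Flight Crew Regained Aircraft Control',
--               'Air Traffic Control Issued Advisory / Alert', 'Flight Crew Landed in Emergency Condition',
--               'Flight Crew Landed In Emergency Condition']
--
-- rate_three = ['General Work Refused', 'Flight Crew Became Reoriented', 'Flight Crew Diverted',
--              'Flight Crew Executed Go Around / Missed Approach',
--              'Flight Crew Overcame Equipment Problem', 'Flight Crew Rejected Takeoff', 'Flight Crew Took Evasive Action',
--              'Air Traffic Control Issued New Clearance']
--
-- rate_two = ['General Maintenance Action', 'General Flight Cancelled / Delayed',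
--               'General Release Refused / Aircraft Not Accepted',
--               'Flight Crew Overrode Automation', 'Flight Crew FLC Overrode Automation',
--               'Flight Crew Exited Penetrated Airspace',
--               'Flight Crew Requested ATC Assistance / Clarification', 'Flight Crew Landed As Precaution',
--               'Flight Crew Returned To Clearance', 'Flight Crew Returned To Departure Airport',
--               'Aircraft Automation Overrode Flight Crew']
--
-- rate_one = ['General Police / Security Involved', 'Flight Crew Returned To Gate', 'Aircraft Equipment Problem Dissipated',
--             'unknown', 'Air Traffic Control Provided Assistance',
--             'General None Reported / Taken', 'Flight Crew FLC complied w / Automation / Advisory']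
-- ===== SOURCE B (Python) =====
-- rate_five = ['General Declared Emergency', 'General Physical Injury / Incapacitation', 'Flight Crew Inflight Shutdown',
--              'Air Traffic Control Separated Traffic', 'Aircraft Aircraft Damaged']
--
-- rate_four = ['General Evacuated', 'Flight Crew Regained Aircraft Control',
--               'Air Traffic Control Issued Advisory / Alert', 'Flight Crew Landed in Emergency Condition',
--               'Flight Crew Landed In Emergency Condition']
--
-- rate_three = ['General Work Refused', 'Flight Crew Became Reoriented', 'Flight Crew Diverted',
--              'Flight Crew Executed Go Around / Missed Approach',
--              'Flight Crew Overcame Equipment Problem', 'Flight Crew Rejected Takeoff', 'Flight Crew Took Evasive Action',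
--              'Air Traffic Control Issued New Clearance']
--
-- rate_two = ['General Maintenance Action', 'General Flight Cancelled / Delayed',
--               'General Release Refused / Aircraft Not Accepted',
--               'Flight Crew Overrode Automation', 'Flight Crew FLC Overrode Automation',
--               'Flight Crew Exited Penetrated Airspace',
--               'Flight Crew Requested ATC Assistance / Clarification', 'Flight Crew Landed As Precaution',
--               'Flight Crew Returned To Clearance', 'Flight Crew Returned To Departure Airport',
--               'Aircraft Automation Overrode Flight Crew']
--
-- rate_one = ['General Police / Security Involved', 'Flight Crew Returned To Gate', 'Aircraft Equipment Problem Dissipated',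
--             'unknown', 'Air Traffic Control Provided Assistance',
--             'General None Reported / Taken', 'Flight Crew FLC complied w / Automation / Advisory']
--
--
-- def risk_quantification(val):
--     stripped = {v.lstrip() for v in val}
--     for rating, tier in ((5, rate_five), (4, rate_four), (3, rate_three),
--                          (2, rate_two), (1, rate_one)):
--         if not stripped.isdisjoint(tier):
--             return rating
--     raise ValueError("no rated event phrase")
-- ===== Notes on version B (the rewrite author's own statement) =====
-- stated objective: alternative
-- what changed: Instead of classifying each item into a ratings list and taking max, B builds the set of lstripped items once and scans the rating tiers in priority order 5..1, returning the first rating whose tier intersects the set; both raise ValueError when nothing matches (excluded by Pre_).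
import Mathlib
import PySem

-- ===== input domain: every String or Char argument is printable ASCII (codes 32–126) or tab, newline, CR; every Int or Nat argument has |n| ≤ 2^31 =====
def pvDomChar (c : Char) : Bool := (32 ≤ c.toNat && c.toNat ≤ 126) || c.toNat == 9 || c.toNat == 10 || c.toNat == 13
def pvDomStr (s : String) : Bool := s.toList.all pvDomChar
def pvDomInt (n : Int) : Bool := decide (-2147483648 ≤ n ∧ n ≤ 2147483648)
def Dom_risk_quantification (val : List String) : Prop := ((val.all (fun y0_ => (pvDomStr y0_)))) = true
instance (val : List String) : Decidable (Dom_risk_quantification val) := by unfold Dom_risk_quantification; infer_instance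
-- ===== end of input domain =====

-- B builds the set of lstripped items once and scans the rating tiers in priority
-- order, returning the first rating whose tier intersects the set (alternative
-- decomposition); Pre_ excludes inputs where no item matches any tier (A raises ValueError there).


-- module constants (shared by both ports, as in the Python module)
def rate_five : List String := ["General Declared Emergency", "General Physical Injury / Incapacitation", "Flight Crew Inflight Shutdown",
  "Air Traffic Control Separated Traffic", "Aircraft Aircraft Damaged"]

def rate_four : List String := ["General Evacuated", "Flight Crew Regained Aircraft Control",
  "Air Traffic Control Issued Advisory / Alert", "Flight Crew Landed in Emergency Condition",
  "Flight Crew Landed In Emergency Condition"]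

def rate_three : List String := ["General Work Refused", "Flight Crew Became Reoriented", "Flight Crew Diverted",
  "Flight Crew Executed Go Around / Missed Approach",
  "Flight Crew Overcame Equipment Problem", "Flight Crew Rejected Takeoff", "Flight Crew Took Evasive Action",
  "Air Traffic Control Issued New Clearance"]

def rate_two : List String := ["General Maintenance Action", "General Flight Cancelled / Delayed",
  "General Release Refused / Aircraft Not Accepted",
  "Flight Crew Overrode Automation", "Flight Crew FLC Overrode Automation",
  "Flight Crew Exited Penetrated Airspace",
  "Flight Crew Requested ATC Assistance / Clarification", "Flight Crew Landed As Precaution",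
  "Flight Crew Returned To Clearance", "Flight Crew Returned To Departure Airport",
  "Aircraft Automation Overrode Flight Crew"]

def rate_one : List String := ["General Police / Security Involved", "Flight Crew Returned To Gate", "Aircraft Equipment Problem Dissipated",
  "unknown", "Air Traffic Control Provided Assistance",
  "General None Reported / Taken", "Flight Crew FLC complied w / Automation / Advisory"]

-- ===== PORT A =====
-- the loop body: lstrip, then the elif chain appending the rating
def riskStep (acc : List Int) (v : String) : List Int :=
  let item := PySem.Str.lstrip v
  if rate_five.contains item then acc ++ [5]
  else if rate_four.contains item then acc ++ [4]
  else if rate_three.contains item then acc ++ [3]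
  else if rate_two.contains item then acc ++ [2]
  else if rate_one.contains item then acc ++ [1]
  else acc

def risk_quantification (val : List String) : Int :=
  let event_risk := val.foldl riskStep []
  -- max(event_risk): raises ValueError on [] in Python — excluded by Pre_; .getD 0 is never the claimed value
  (PySem.List.max? event_risk (fun x => x)).getD 0

-- ===== PORT B =====
def risk_quantification_alt (val : List String) : Int :=
  let stripped : PySem.Set String := PySem.Set.ofList (val.map (fun v => PySem.Str.lstrip v))
  if PySem.Set.isdisjoint stripped rate_five = false then 5
  else if PySem.Set.isdisjoint stripped rate_four = false then 4
  else if PySem.Set.isdisjoint stripped rate_three = false then 3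
  else if PySem.Set.isdisjoint stripped rate_two = false then 2
  else if PySem.Set.isdisjoint stripped rate_one = false then 1
  else 0  -- Python raises ValueError here; outside Pre_

-- ===== PRECONDITION & SPEC =====
-- Pre_ excludes exactly the inputs on which no item, after lstrip, is in any rating tier: there A raises ValueError (max of an empty list) and B raises ValueError too.
def Pre_risk_quantification (val : List String) : Prop :=
  ∃ v ∈ val, PySem.Str.lstrip v ∈ (rate_five ++ rate_four ++ rate_three ++ rate_two ++ rate_one)

instance (val : List String) : Decidable (Pre_risk_quantification val) := by
  unfold Pre_risk_quantification; infer_instance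

def pvWitness_risk_quantification : List String := ["  Flight Crew Diverted"]

def Spec_risk_quantification (val : List String) (out : Int) : Prop := out = risk_quantification_alt val
instance (val : List String) (out : Int) : Decidable (Spec_risk_quantification val out) := by unfold Spec_risk_quantification; infer_instance

-- ===== CLAIM (what is proved, stated in full; the proofs are below) =====
def Claim_equal_risk_quantification : Prop := ∀ (val : List String), Dom_risk_quantification val → Pre_risk_quantification val → Spec_risk_quantification val (risk_quantification val)

-- ===== LEMMAS AND PROOFS =====

-- the per-item rating A's elif chain assigns (none = unclassified)
def rateOf (v : String) : Option Int :=
  let item := PySem.Str.lstrip v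
  if rate_five.contains item then some 5
  else if rate_four.contains item then some 4
  else if rate_three.contains item then some 3
  else if rate_two.contains item then some 2
  else if rate_one.contains item then some 1
  else none

lemma riskStep_eq (acc : List Int) (v : String) :
    riskStep acc v = acc ++ (rateOf v).toList := by
  simp only [riskStep, rateOf]
  split_ifs <;> simp

lemma foldl_riskStep (val : List String) (acc : List Int) :
    val.foldl riskStep acc = acc ++ val.flatMap (fun v => (rateOf v).toList) := by
  induction val generalizing acc with
  | nil => simp
  | cons v t ih => simp [List.foldl_cons, riskStep_eq, ih]

def risks (val : List String) : List Int := val.flatMap (fun v => (rateOf v).toList)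

lemma mem_risks_iff (val : List String) (x : Int) :
    x ∈ risks val ↔ ∃ v ∈ val, rateOf v = some x := by
  simp [risks, Option.mem_toList]

lemma risks_le_five (val : List String) : ∀ x ∈ risks val, x ≤ 5 := by
  intro x hx
  rcases (mem_risks_iff val x).1 hx with ⟨v, _, hr⟩
  simp only [rateOf] at hr
  split_ifs at hr <;> simp_all <;> omega

-- a "hit at level r" for B's disjointness tests
lemma not_isdisjoint_iff (val : List String) (tier : List String) :
    PySem.Set.isdisjoint (PySem.Set.ofList (val.map (fun v => PySem.Str.lstrip v))) tier = false
      ↔ ∃ v ∈ val, PySem.Str.lstrip v ∈ tier := by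
  rw [Bool.eq_false_iff, Ne, PySem.Set.isdisjoint_iff]
  constructor
  · intro h
    push Not at h
    rcases h with ⟨x, hx, hxt⟩
    rw [PySem.Set.mem_ofList] at hx
    rcases List.mem_map.1 hx with ⟨v, hv, rfl⟩
    exact ⟨v, hv, hxt⟩
  · rintro ⟨v, hv, ht⟩ h
    exact h (PySem.Str.lstrip v) ((PySem.Set.mem_ofList _ _).2 (List.mem_map.2 ⟨v, hv, rfl⟩)) ht

lemma max_eq_of_hit (val : List String) (m : Int)
    (hmem : m ∈ risks val) (hub : ∀ x ∈ risks val, x ≤ m) :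
    risk_quantification val = m := by
  unfold risk_quantification
  rw [foldl_riskStep, List.nil_append]
  have hne : risks val ≠ [] := List.ne_nil_of_mem hmem
  obtain ⟨y, hy⟩ : ∃ y, PySem.List.max? (risks val) (fun x => x) = some y := by
    cases h : PySem.List.max? (risks val) (fun x => x) with
    | none => exact absurd ((PySem.List.max?_eq_none_iff _ _).1 h) hne
    | some y => exact ⟨y, rfl⟩
  have hymem : y ∈ risks val := PySem.List.max?_mem hy
  have h1 : y ≤ m := hub y hymem
  have h2 : m ≤ y := PySem.List.max?_isMax hy m hmem
  show (PySem.List.max? (risks val) (fun x => x)).getD 0 = m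
  rw [hy]; simpa using le_antisymm h1 h2

-- level-r membership facts about risks
lemma five_mem_risks_iff (val : List String) :
    (5 : Int) ∈ risks val ↔ ∃ v ∈ val, PySem.Str.lstrip v ∈ rate_five := by
  rw [mem_risks_iff]
  constructor
  · rintro ⟨v, hv, hr⟩
    refine ⟨v, hv, ?_⟩
    simp only [rateOf] at hr
    split_ifs at hr with h1 h2 h3 h4 h5 <;> simp_all
  · rintro ⟨v, hv, h⟩
    refine ⟨v, hv, ?_⟩
    simp only [rateOf]
    simp_all [List.contains_eq_mem]

lemma four_mem_risks_iff (val : List String)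
    (h5 : ¬ ∃ v ∈ val, PySem.Str.lstrip v ∈ rate_five) :
    (4 : Int) ∈ risks val ↔ ∃ v ∈ val, PySem.Str.lstrip v ∈ rate_four := by
  rw [mem_risks_iff]
  constructor
  · rintro ⟨v, hv, hr⟩
    refine ⟨v, hv, ?_⟩
    simp only [rateOf] at hr
    split_ifs at hr <;> simp_all
  · rintro ⟨v, hv, h⟩
    refine ⟨v, hv, ?_⟩
    have hv5 : ¬ rate_five.contains (PySem.Str.lstrip v) := by
      simp only [List.contains_eq_mem, decide_eq_true_eq]
      exact fun hc => h5 ⟨v, hv, hc⟩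
    simp only [rateOf]
    simp_all [List.contains_eq_mem]

lemma three_mem_risks_iff (val : List String)
    (h5 : ¬ ∃ v ∈ val, PySem.Str.lstrip v ∈ rate_five)
    (h4 : ¬ ∃ v ∈ val, PySem.Str.lstrip v ∈ rate_four) :
    (3 : Int) ∈ risks val ↔ ∃ v ∈ val, PySem.Str.lstrip v ∈ rate_three := by
  rw [mem_risks_iff]
  constructor
  · rintro ⟨v, hv, hr⟩
    refine ⟨v, hv, ?_⟩
    simp only [rateOf] at hr
    split_ifs at hr <;> simp_all
  · rintro ⟨v, hv, h⟩
    refine ⟨v, hv, ?_⟩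
    have hv5 : ¬ rate_five.contains (PySem.Str.lstrip v) := by
      simp only [List.contains_eq_mem, decide_eq_true_eq]
      exact fun hc => h5 ⟨v, hv, hc⟩
    have hv4 : ¬ rate_four.contains (PySem.Str.lstrip v) := by
      simp only [List.contains_eq_mem, decide_eq_true_eq]
      exact fun hc => h4 ⟨v, hv, hc⟩
    simp only [rateOf]
    simp_all [List.contains_eq_mem]

lemma two_mem_risks_iff (val : List String)
    (h5 : ¬ ∃ v ∈ val, PySem.Str.lstrip v ∈ rate_five)
    (h4 : ¬ ∃ v ∈ val, PySem.Str.lstrip v ∈ rate_four)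
    (h3 : ¬ ∃ v ∈ val, PySem.Str.lstrip v ∈ rate_three) :
    (2 : Int) ∈ risks val ↔ ∃ v ∈ val, PySem.Str.lstrip v ∈ rate_two := by
  rw [mem_risks_iff]
  constructor
  · rintro ⟨v, hv, hr⟩
    refine ⟨v, hv, ?_⟩
    simp only [rateOf] at hr
    split_ifs at hr <;> simp_all
  · rintro ⟨v, hv, h⟩
    refine ⟨v, hv, ?_⟩
    have hv5 : ¬ rate_five.contains (PySem.Str.lstrip v) := by
      simp only [List.contains_eq_mem, decide_eq_true_eq]
      exact fun hc => h5 ⟨v, hv, hc⟩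
    have hv4 : ¬ rate_four.contains (PySem.Str.lstrip v) := by
      simp only [List.contains_eq_mem, decide_eq_true_eq]
      exact fun hc => h4 ⟨v, hv, hc⟩
    have hv3 : ¬ rate_three.contains (PySem.Str.lstrip v) := by
      simp only [List.contains_eq_mem, decide_eq_true_eq]
      exact fun hc => h3 ⟨v, hv, hc⟩
    simp only [rateOf]
    simp_all [List.contains_eq_mem]

lemma one_mem_risks_iff (val : List String)
    (h5 : ¬ ∃ v ∈ val, PySem.Str.lstrip v ∈ rate_five)
    (h4 : ¬ ∃ v ∈ val, PySem.Str.lstrip v ∈ rate_four)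
    (h3 : ¬ ∃ v ∈ val, PySem.Str.lstrip v ∈ rate_three)
    (h2 : ¬ ∃ v ∈ val, PySem.Str.lstrip v ∈ rate_two) :
    (1 : Int) ∈ risks val ↔ ∃ v ∈ val, PySem.Str.lstrip v ∈ rate_one := by
  rw [mem_risks_iff]
  constructor
  · rintro ⟨v, hv, hr⟩
    refine ⟨v, hv, ?_⟩
    simp only [rateOf] at hr
    split_ifs at hr <;> simp_all
  · rintro ⟨v, hv, h⟩
    refine ⟨v, hv, ?_⟩
    have hv5 : ¬ rate_five.contains (PySem.Str.lstrip v) := by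
      simp only [List.contains_eq_mem, decide_eq_true_eq]
      exact fun hc => h5 ⟨v, hv, hc⟩
    have hv4 : ¬ rate_four.contains (PySem.Str.lstrip v) := by
      simp only [List.contains_eq_mem, decide_eq_true_eq]
      exact fun hc => h4 ⟨v, hv, hc⟩
    have hv3 : ¬ rate_three.contains (PySem.Str.lstrip v) := by
      simp only [List.contains_eq_mem, decide_eq_true_eq]
      exact fun hc => h3 ⟨v, hv, hc⟩
    have hv2 : ¬ rate_two.contains (PySem.Str.lstrip v) := by
      simp only [List.contains_eq_mem, decide_eq_true_eq]
      exact fun hc => h2 ⟨v, hv, hc⟩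
    simp only [rateOf]
    simp_all [List.contains_eq_mem]

lemma risks_bounds (val : List String) : ∀ x ∈ risks val, 1 ≤ x ∧ x ≤ 5 := by
  intro x hx
  rcases (mem_risks_iff val x).1 hx with ⟨v, _, hr⟩
  simp only [rateOf] at hr
  split_ifs at hr <;> simp_all <;> omega

-- ===== VERDICT (by name: the statement is the Claim_ definition above) =====
theorem risk_quantification_spec : Claim_equal_risk_quantification := by
  intro val _ hpre
  unfold Spec_risk_quantification risk_quantification_alt
  by_cases h5 : ∃ v ∈ val, PySem.Str.lstrip v ∈ rate_five
  · rw [if_pos ((not_isdisjoint_iff val rate_five).2 h5)]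
    exact max_eq_of_hit val 5 ((five_mem_risks_iff val).2 h5) (risks_le_five val)
  · rw [if_neg (by simpa [not_isdisjoint_iff val rate_five] using h5)]
    by_cases h4 : ∃ v ∈ val, PySem.Str.lstrip v ∈ rate_four
    · rw [if_pos ((not_isdisjoint_iff val rate_four).2 h4)]
      refine max_eq_of_hit val 4 ((four_mem_risks_iff val h5).2 h4) ?_
      intro x hx
      rcases risks_bounds val x hx with ⟨_, hle⟩
      by_contra hgt
      have hx5 : x = 5 := by omega
      subst hx5
      exact h5 ((five_mem_risks_iff val).1 hx)
    · rw [if_neg (by simpa [not_isdisjoint_iff val rate_four] using h4)]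
      by_cases h3 : ∃ v ∈ val, PySem.Str.lstrip v ∈ rate_three
      · rw [if_pos ((not_isdisjoint_iff val rate_three).2 h3)]
        refine max_eq_of_hit val 3 ((three_mem_risks_iff val h5 h4).2 h3) ?_
        intro x hx
        rcases risks_bounds val x hx with ⟨_, hle⟩
        by_contra hgt
        interval_cases x
        · exact h4 ((four_mem_risks_iff val h5).1 hx)
        · exact h5 ((five_mem_risks_iff val).1 hx)
      · rw [if_neg (by simpa [not_isdisjoint_iff val rate_three] using h3)]
        by_cases h2 : ∃ v ∈ val, PySem.Str.lstrip v ∈ rate_two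
        · rw [if_pos ((not_isdisjoint_iff val rate_two).2 h2)]
          refine max_eq_of_hit val 2 ((two_mem_risks_iff val h5 h4 h3).2 h2) ?_
          intro x hx
          rcases risks_bounds val x hx with ⟨_, hle⟩
          by_contra hgt
          interval_cases x
          · exact h3 ((three_mem_risks_iff val h5 h4).1 hx)
          · exact h4 ((four_mem_risks_iff val h5).1 hx)
          · exact h5 ((five_mem_risks_iff val).1 hx)
        · rw [if_neg (by simpa [not_isdisjoint_iff val rate_two] using h2)]
          by_cases h1 : ∃ v ∈ val, PySem.Str.lstrip v ∈ rate_one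
          · rw [if_pos ((not_isdisjoint_iff val rate_one).2 h1)]
            refine max_eq_of_hit val 1 ((one_mem_risks_iff val h5 h4 h3 h2).2 h1) ?_
            intro x hx
            rcases risks_bounds val x hx with ⟨_, hle⟩
            by_contra hgt
            interval_cases x
            · exact h2 ((two_mem_risks_iff val h5 h4 h3).1 hx)
            · exact h3 ((three_mem_risks_iff val h5 h4).1 hx)
            · exact h4 ((four_mem_risks_iff val h5).1 hx)
            · exact h5 ((five_mem_risks_iff val).1 hx)
          · exfalso
            rcases hpre with ⟨v, hv, hmem⟩
            simp only [List.mem_append] at hmem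
            rcases hmem with ((((h|h)|h)|h)|h)
            · exact h5 ⟨v, hv, h⟩
            · exact h4 ⟨v, hv, h⟩
            · exact h3 ⟨v, hv, h⟩
            · exact h2 ⟨v, hv, h⟩
            · exact h1 ⟨v, hv, h⟩
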